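-- pv_equiv track=rewrite | github.com/Gesinne/rpi-azure-bridge | lee_estado_placas.py | fmt_alarmas
-- ===== SOURCE A (Python) =====
-- def fmt_alarmas(v):
--     if v is None:
--         return "(no responde)"
--     if v == 0:
--         return "(ninguna)"
--     bits = []
--     for i in range(16):
--         if v & (1 << i):
--             bits.append(f"bit{i}")
--     return ",".join(bits) + f"  [0x{v:04X}]"
-- ===== SOURCE B (Python) =====
-- def _bits(n, i):
--     # recursion on the value: peel the low bit, halve, stop when no bits remain
--     if not n:
--         return []
--     rest = _bits(n >> 1, i + 1)
--     return [f"bit{i}"] + rest if n & 1 else rest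
--
--
-- def fmt_alarmas(v):
--     if v is None:
--         return "(no responde)"
--     if v == 0:
--         return "(ninguna)"
--     return ",".join(_bits(v & 0xFFFF, 0)) + f"  [0x{v:04X}]"
-- ===== Notes on version B (the rewrite author's own statement) =====
-- stated objective: alternative
-- what changed: Replaces the fixed 16-position index scan testing v & (1 << i) with a recursion on the masked value itself (halving and peeling the low bit, stopping as soon as no set bits remain).
import Mathlib
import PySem

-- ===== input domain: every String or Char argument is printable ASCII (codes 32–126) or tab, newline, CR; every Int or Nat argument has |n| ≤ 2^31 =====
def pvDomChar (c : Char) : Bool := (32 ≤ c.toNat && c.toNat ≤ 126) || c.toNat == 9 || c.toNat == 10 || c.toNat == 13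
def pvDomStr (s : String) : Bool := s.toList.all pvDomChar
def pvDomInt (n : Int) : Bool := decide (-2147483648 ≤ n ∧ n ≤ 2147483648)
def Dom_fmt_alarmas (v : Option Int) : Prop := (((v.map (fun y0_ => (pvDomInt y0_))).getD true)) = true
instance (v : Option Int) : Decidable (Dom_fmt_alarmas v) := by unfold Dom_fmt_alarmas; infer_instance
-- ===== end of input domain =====

-- B replaces A's fixed 16-position index scan with a recursion on the masked value
-- (halve, peel the low bit, stop when no bits remain): a different decomposition, same cost class.


-- shared helper: Python's f"{v:04X}" (upper-case hex of |v|, zero-padded to total width 4, sign first);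
-- both Pythons contain this same f-string, so both ports share this transliteration of it.
def hexDigit (n : Nat) : Char := if n < 10 then Char.ofNat (48 + n) else Char.ofNat (55 + n)

def hexChars (n : Nat) : List Char :=
  if _h : n < 16 then [hexDigit n]
  else hexChars (n / 16) ++ [hexDigit (n % 16)]
  termination_by n
  decreasing_by exact Nat.div_lt_self (by omega) (by omega)

def fmt04X (v : Int) : String :=
  if v < 0 then
    String.ofList ('-' :: (List.replicate (3 - (hexChars v.natAbs).length) '0' ++ hexChars v.natAbs))
  else
    String.ofList (List.replicate (4 - (hexChars v.natAbs).length) '0' ++ hexChars v.natAbs)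

-- ===== PORT A =====
def fmt_alarmas (v : Option Int) : String :=
  match v with
  | none => "(no responde)"                 -- if v is None
  | some v =>
    if v = 0 then "(ninguna)"               -- if v == 0
    else
      -- for i in range(16): if v & (1 << i): bits.append(f"bit{i}")
      let bits := (PySem.List.pyRange 0 16).foldl
        (fun acc (i : Int) => if (Int.land v (1 <<< i)) != 0 then acc ++ ["bit" ++ PySem.Int.toStr i] else acc) []
      PySem.Str.join "," bits ++ "  [0x" ++ fmt04X v ++ "]"

-- ===== PORT B =====
-- _bits(n, i): n = v & 0xFFFF is nonnegative (masked), so it is carried as a Nat;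
-- n >> 1 is n / 2 and the truthiness of n & 1 is n % 2 = 1 — exact on nonnegative ints.
def bitNames (n : Nat) (i : Nat) : List String :=
  if n = 0 then []
  else
    let rest := bitNames (n / 2) (i + 1)
    if n % 2 = 1 then ("bit" ++ PySem.Int.toStr (i : Int)) :: rest else rest
  termination_by n
  decreasing_by exact Nat.div_lt_self (by omega) (by omega)

def fmt_alarmas_alt (v : Option Int) : String :=
  match v with
  | none => "(no responde)"
  | some v =>
    if v = 0 then "(ninguna)"
    else
      PySem.Str.join "," (bitNames (Int.land v 65535).toNat 0) ++ "  [0x" ++ fmt04X v ++ "]"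

-- ===== PRECONDITION & SPEC =====
def Spec_fmt_alarmas (v : Option Int) (out : String) : Prop := out = fmt_alarmas_alt v
instance (v : Option Int) (out : String) : Decidable (Spec_fmt_alarmas v out) := by unfold Spec_fmt_alarmas; infer_instance

-- ===== CLAIM (what is proved, stated in full; the proofs are below) =====
def Claim_equal_fmt_alarmas : Prop := ∀ (v : Option Int), Dom_fmt_alarmas v → Spec_fmt_alarmas v (fmt_alarmas v)

-- ===== LEMMAS AND PROOFS =====

-- B's recursion produces exactly the (ascending) set-bit names of n, offset by i.
theorem bitNames_eq (k : Nat) : ∀ (n i : Nat), n < 2 ^ k →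
    bitNames n i = ((List.range k).filter n.testBit).map
      (fun j => "bit" ++ PySem.Int.toStr ((i + j : Nat) : Int)) := by
  induction k with
  | zero =>
    intro n i h
    interval_cases n
    simp [bitNames]
  | succ k ih =>
    intro n i h
    by_cases h0 : n = 0
    · subst h0; simp [bitNames]
    · rw [bitNames]
      simp only [h0, if_false]
      have hlt : n / 2 < 2 ^ k := by
        have h2 : n < 2 ^ k * 2 := by
          have : 2 ^ (k + 1) = 2 ^ k * 2 := by ring
          omega
        omega
      rw [ih (n / 2) (i + 1) hlt]
      rw [List.range_succ_eq_map]
      rw [List.filter_cons]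
      rw [List.filter_map]
      simp only [Nat.testBit_zero]
      have hf : List.filter (n.testBit ∘ Nat.succ) (List.range k)
          = List.filter (n / 2).testBit (List.range k) :=
        List.filter_congr (fun j _ => by
          simp only [Function.comp_apply, Nat.succ_eq_add_one, Nat.testBit_succ])
      rcases Nat.mod_two_eq_zero_or_one n with hp | hp <;>
        · simp only [hp]
          norm_num
          rw [hf]
          apply List.map_congr_left
          intro j _
          simp only [Function.comp_apply, Nat.succ_eq_add_one]
          congr 2
          omega

-- nonzero single-bit mask facts over Nat
theorem land_two_pow (a j : Nat) : a &&& 2 ^ j = if a.testBit j then 2 ^ j else 0 := by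
  apply Nat.eq_of_testBit_eq
  intro k
  rw [Nat.testBit_land]
  by_cases hk : j = k
  · subst hk
    by_cases hb : a.testBit j <;> simp [hb]
  · by_cases hb : a.testBit j <;> simp [hb, hk]

theorem ldiff_two_pow (a j : Nat) : Nat.ldiff (2 ^ j) a = if a.testBit j then 0 else 2 ^ j := by
  apply Nat.eq_of_testBit_eq
  intro k
  rw [Nat.testBit_ldiff]
  by_cases hk : j = k
  · subst hk
    by_cases hb : a.testBit j <;> simp [hb]
  · by_cases hb : a.testBit j <;> simp [hb, hk]

-- the bridge: A's truthiness test on bit j equals bit j of the masked value B recurses on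
theorem bridge (v : Int) (j : Nat) (hj : j < 16) :
    ((Int.land v (1 <<< ((j : Nat) : Int))) != 0) = (Int.land v 65535).toNat.testBit j := by
  have h65535 : (65535 : Nat) = 2 ^ 16 - 1 := by norm_num
  rw [Int.one_shiftLeft]
  cases v with
  | ofNat a =>
    have h1 : Int.land (Int.ofNat a) ((2 ^ j : Nat) : Int) = Int.ofNat (a &&& 2 ^ j) := rfl
    have h2 : Int.land (Int.ofNat a) 65535 = Int.ofNat (a &&& 65535) := rfl
    rw [h1, h2]
    have h3 : (Int.ofNat (a &&& 2 ^ j) != 0) = decide (a &&& 2 ^ j ≠ 0) := by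
      by_cases hx : (a &&& 2 ^ j) = 0 <;> simp [hx, bne, Int.natCast_eq_zero]
    have htn : (Int.ofNat (a &&& 65535)).toNat = a &&& 65535 := rfl
    rw [h3, htn, Nat.testBit_land, h65535, Nat.testBit_two_pow_sub_one]
    rw [land_two_pow]
    by_cases hb : a.testBit j <;> simp [hb, hj]
  | negSucc a =>
    have h1 : Int.land (Int.negSucc a) ((2 ^ j : Nat) : Int) = Int.ofNat (Nat.ldiff (2 ^ j) a) := rfl
    have h2 : Int.land (Int.negSucc a) 65535 = Int.ofNat (Nat.ldiff 65535 a) := rfl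
    rw [h1, h2]
    have h3 : (Int.ofNat (Nat.ldiff (2 ^ j) a) != 0) = decide (Nat.ldiff (2 ^ j) a ≠ 0) := by
      by_cases hx : Nat.ldiff (2 ^ j) a = 0 <;> simp [hx, bne, Int.natCast_eq_zero]
    have htn : (Int.ofNat (Nat.ldiff 65535 a)).toNat = Nat.ldiff 65535 a := rfl
    rw [h3, htn, Nat.testBit_ldiff, h65535, Nat.testBit_two_pow_sub_one]
    rw [ldiff_two_pow]
    by_cases hb : a.testBit j <;> simp [hb, hj]

theorem mask_lt (v : Int) : (Int.land v 65535).toNat < 2 ^ 16 := by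
  cases v with
  | ofNat a =>
    have h : (Int.land (Int.ofNat a) 65535).toNat = a &&& 65535 := rfl
    rw [h]
    have := Nat.and_le_right (n := a) (m := 65535)
    omega
  | negSucc a =>
    have h : (Int.land (Int.negSucc a) 65535).toNat = Nat.ldiff 65535 a := rfl
    rw [h]
    apply Nat.lt_pow_two_of_testBit
    intro i hi
    rw [Nat.testBit_ldiff]
    have h1 : (65535 : Nat).testBit i = false :=
      Nat.testBit_lt_two_pow (lt_of_lt_of_le (by norm_num) (Nat.pow_le_pow_right (by omega) hi))
    simp [h1]

-- ===== VERDICT (by name: the statement is the Claim_ definition above) =====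
theorem fmt_alarmas_spec : Claim_equal_fmt_alarmas := by
  intro v _
  unfold Spec_fmt_alarmas
  match v with
  | none => rfl
  | some v =>
    by_cases h0 : v = 0
    · simp [fmt_alarmas, fmt_alarmas_alt, h0]
    · simp only [fmt_alarmas, fmt_alarmas_alt, h0, if_false]
      congr 1
      congr 1
      -- A's loop collects exactly the filtered names
      rw [PySem.List.foldl_append_if (fun (i : Int) => (Int.land v (1 <<< i)) != 0)
            (fun (i : Int) => "bit" ++ PySem.Int.toStr i)]
      rw [List.nil_append, PySem.List.pyRange_one, List.filter_map, List.map_map]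
      -- B's recursion produces the testBit-filtered names
      rw [bitNames_eq 16 _ 0 (mask_lt v)]
      simp only [Function.comp_def, zero_add]
      norm_num
      rw [show Int.toNat 16 = 16 from rfl]
      rw [List.filter_congr (fun j hj => (bridge v j (List.mem_range.mp hj)))]
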